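-- pv_equiv track=rewrite | github.com/3veryDay/Growing | ProgrammersLv2/숫자 카드 나누기.py | check
-- ===== SOURCE A (Python) =====
-- from math import gcd
-- from functools import reduce
-- from math import gcd
-- from functools import reduce
--
-- def check(arrayA, arrayB):
--     gcd_A = reduce(gcd, arrayA, arrayA[0])
--     factors = [i for i in range(1, gcd_A//2+1) if not gcd_A % i]
--     factors.append(gcd_A)
--     for factor in factors[::-1]:
--         if all(i % factor for i in arrayB):
--             return gcd_A
--     return 0
-- ===== SOURCE B (Python) =====
-- from math import gcd
-- from functools import reduce
--
-- def check(arrayA, arrayB):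
--     # Any divisor of g divides every multiple of g, so if g fails (some b is a
--     # multiple of g) every smaller divisor fails too: checking g alone suffices.
--     g = reduce(gcd, arrayA, 0)
--     return g if all(b % g for b in arrayB) else 0
-- ===== Notes on version B (the rewrite author's own statement) =====
-- stated objective: simpler
-- what changed: B drops A's enumeration of all divisors of gcd(arrayA) and its reversed-loop scan: since every divisor of g divides any multiple of g, testing g itself is sufficient, so B computes the gcd once and does a single divisibility pass over arrayB.
import Mathlib
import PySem

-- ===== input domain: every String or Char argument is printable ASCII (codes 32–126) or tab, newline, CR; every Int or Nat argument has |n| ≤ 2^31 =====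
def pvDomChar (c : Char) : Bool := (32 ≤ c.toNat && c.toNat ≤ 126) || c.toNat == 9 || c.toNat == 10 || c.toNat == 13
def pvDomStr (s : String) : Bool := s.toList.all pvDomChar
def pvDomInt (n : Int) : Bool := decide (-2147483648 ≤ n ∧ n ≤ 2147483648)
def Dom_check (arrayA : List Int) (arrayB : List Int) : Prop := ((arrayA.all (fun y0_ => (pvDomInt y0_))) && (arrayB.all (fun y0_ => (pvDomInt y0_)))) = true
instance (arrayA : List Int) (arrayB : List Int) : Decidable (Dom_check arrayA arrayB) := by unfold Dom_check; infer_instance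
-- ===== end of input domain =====

-- B checks divisibility by gcd(arrayA) alone instead of enumerating all its divisors
-- (any divisor of g divides every multiple of g): shorter and plainer, same value.

-- ===== PORT A =====
-- math.gcd(a, b) = gcd(|a|, |b|) ≥ 0; Int.gcd is exactly that (as a Nat).
def pygcd (a b : Int) : Int := (Int.gcd a b : Int)

-- the 'for factor in factors[::-1]: if all(...): return gcd_A' loop; 'return 0' after it
def checkLoop (gcdA : Int) (arrayB : List Int) : List Int → Int
  | [] => 0
  | f :: fs =>
    if arrayB.all (fun i => decide (PySem.Int.mod i f ≠ 0)) then gcdA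
    else checkLoop gcdA arrayB fs

def check (arrayA : List Int) (arrayB : List Int) : Int :=
  -- gcd_A = reduce(gcd, arrayA, arrayA[0]); arrayA[0] raises on [] (excluded by Pre_)
  let gcdA := arrayA.foldl pygcd ((PySem.List.pyGet? arrayA 0).getD 0)
  -- factors = [i for i in range(1, gcd_A//2+1) if not gcd_A % i]; factors.append(gcd_A)
  let factors := (PySem.List.pyRange 1 (PySem.Int.floordiv gcdA 2 + 1) 1).filter
      (fun i => decide (PySem.Int.mod gcdA i = 0))
  -- factors[::-1] is the reversed list (exact)
  checkLoop gcdA arrayB ((factors ++ [gcdA]).reverse)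

-- ===== PORT B =====
def check_alt (arrayA : List Int) (arrayB : List Int) : Int :=
  let g := arrayA.foldl pygcd 0
  if arrayB.all (fun b => decide (PySem.Int.mod b g ≠ 0)) then g else 0

-- ===== PRECONDITION & SPEC =====
-- Pre_ excludes exactly where A raises: empty arrayA (IndexError on arrayA[0]) and
-- all-zero arrayA with nonempty arrayB (gcd_A = 0, ZeroDivisionError on i % 0).
def Pre_check (arrayA : List Int) (arrayB : List Int) : Prop :=
  arrayA ≠ [] ∧ (arrayB = [] ∨ arrayA.any (fun a => decide (a ≠ 0)) = true)
instance (arrayA : List Int) (arrayB : List Int) : Decidable (Pre_check arrayA arrayB) := by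
  unfold Pre_check; infer_instance

def pvWitness_check : List Int × List Int := ([6, 9], [4, 5])

def Spec_check (arrayA : List Int) (arrayB : List Int) (out : Int) : Prop := out = check_alt arrayA arrayB
instance (arrayA : List Int) (arrayB : List Int) (out : Int) : Decidable (Spec_check arrayA arrayB out) := by unfold Spec_check; infer_instance

-- ===== CLAIM (what is proved, stated in full; the proofs are below) =====
def Claim_equal_check : Prop := ∀ (arrayA : List Int) (arrayB : List Int), Dom_check arrayA arrayB → Pre_check arrayA arrayB → Spec_check arrayA arrayB (check arrayA arrayB)
-- ===== LEMMAS AND PROOFS =====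

theorem pygcd_self (a : Int) : pygcd a a = pygcd 0 a := by
  simp [pygcd, Int.gcd]

-- A's fold (seeded with arrayA[0]) equals B's fold (seeded with 0) on a nonempty list.
theorem fold_seed_eq (a : Int) (t : List Int) :
    (a :: t).foldl pygcd a = (a :: t).foldl pygcd 0 := by
  simp [List.foldl_cons, pygcd_self]

-- the loop returns 0 when some b is a multiple of g and every listed factor divides g
theorem checkLoop_eq_zero (g : Int) (arrayB : List Int) (L : List Int)
    (hb : ∃ b ∈ arrayB, PySem.Int.mod b g = 0)
    (hL : ∀ f ∈ L, f ∣ g) : checkLoop g arrayB L = 0 := by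
  induction L with
  | nil => rfl
  | cons f fs ih =>
    obtain ⟨b, hbB, hbg⟩ := hb
    have hgb : g ∣ b := (PySem.Int.mod_eq_zero_iff_dvd b g).mp hbg
    have hfb : f ∣ b := dvd_trans (hL f (by simp)) hgb
    have hcond : arrayB.all (fun i => decide (PySem.Int.mod i f ≠ 0)) = false := by
      rw [List.all_eq_false]
      exact ⟨b, hbB, by simp [(PySem.Int.mod_eq_zero_iff_dvd b f).mpr hfb]⟩
    rw [checkLoop, hcond]
    simp only [Bool.false_eq_true, if_false]
    exact ih (fun f' hf' => hL f' (by simp [hf']))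

-- every element of A's factor list (with gcd_A appended) divides gcd_A
theorem factors_dvd (g f : Int)
    (hf : f ∈ ((PySem.List.pyRange 1 (PySem.Int.floordiv g 2 + 1) 1).filter
      (fun i => decide (PySem.Int.mod g i = 0)) ++ [g])) : f ∣ g := by
  rcases List.mem_append.mp hf with h | h
  · have := List.mem_filter.mp h
    exact (PySem.Int.mod_eq_zero_iff_dvd g f).mp (by simpa using this.2)
  · rw [List.mem_singleton] at h; subst h; exact dvd_refl f

theorem check_eq_check_alt (arrayA arrayB : List Int) (hA : arrayA ≠ []) :
    check arrayA arrayB = check_alt arrayA arrayB := by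
  obtain ⟨a, t, rfl⟩ := List.exists_cons_of_ne_nil hA
  have hhead : ((PySem.List.pyGet? (a :: t) 0).getD 0) = a := by
    simp [PySem.List.pyGet?, PySem.List.pyIdx?]
  simp only [check, check_alt]
  rw [hhead, fold_seed_eq]
  set g := (a :: t).foldl pygcd 0 with hg
  set factors := (PySem.List.pyRange 1 (PySem.Int.floordiv g 2 + 1) 1).filter
      (fun i => decide (PySem.Int.mod g i = 0)) with hfactors
  by_cases hall : arrayB.all (fun b => decide (PySem.Int.mod b g ≠ 0)) = true
  · -- gcd_A itself is first in factors[::-1]; its test succeeds, both return g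
    have hrev : (factors ++ [g]).reverse = g :: factors.reverse := by simp
    rw [hrev, checkLoop, hall]; simp
  · -- some b is a multiple of g, hence of every factor: loop falls through, both 0
    rw [if_neg hall]
    apply checkLoop_eq_zero
    · rw [Bool.not_eq_true, List.all_eq_false] at hall
      obtain ⟨b, hbB, hb⟩ := hall
      exact ⟨b, hbB, by simpa using hb⟩
    · intro f hf
      rw [List.mem_reverse, List.mem_append] at hf
      exact factors_dvd g f (List.mem_append.mpr hf)

-- ===== VERDICT (by name: the statement is the Claim_ definition above) =====
theorem check_spec : Claim_equal_check := by
  intro arrayA arrayB _ hpre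
  exact check_eq_check_alt arrayA arrayB hpre.1
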